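-- pv_equiv track=rewrite | github.com/rabihbader/o1_research | 1_o1_researcher_basic_1.py | parse_agent_response
-- ===== SOURCE A (Python) =====
-- from typing import List, Dict
--
-- def parse_agent_response(response: str) -> Dict[str, List[str]]:
--     search_terms = []
--     actions = []
--
--     for line in response.split('\n'):
--         if line.startswith('<search_terms>') and line.endswith('</search_terms>'):
--             terms = line[14:-15].strip()
--             search_terms.extend([term.strip() for term in terms.split(',')])
--         elif line.startswith('<action>') and line.endswith('</action>'):
--             actions.append(line[8:-9].strip())
--
--     return {"search_terms": search_terms, "actions": actions}
-- ===== SOURCE B (Python) =====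
-- import re
--
-- _SEARCH = re.compile(r'^<search_terms>(.*)</search_terms>$', re.MULTILINE)
-- _ACTION = re.compile(r'^<action>(.*)</action>$', re.MULTILINE)
--
-- def parse_agent_response(response):
--     search_terms = [t.strip()
--                     for content in _SEARCH.findall(response)
--                     for t in content.strip().split(',')]
--     actions = [c.strip() for c in _ACTION.findall(response)]
--     return {"search_terms": search_terms, "actions": actions}
-- ===== Notes on version B (the rewrite author's own statement) =====
-- stated objective: idiomatic
-- what changed: Replaces the per-line stateful loop (two accumulators and an if/elif chain over the newline-split lines) by two anchored multiline regex scans over the whole response (re.findall with MULTILINE start/end anchors and a greedy capture group), each followed by a comprehension; correct because the dot metacharacter never matches a newline, so each match is exactly one fully-tagged line and the greedy capture equals the fixed-offset slice.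
import Mathlib
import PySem

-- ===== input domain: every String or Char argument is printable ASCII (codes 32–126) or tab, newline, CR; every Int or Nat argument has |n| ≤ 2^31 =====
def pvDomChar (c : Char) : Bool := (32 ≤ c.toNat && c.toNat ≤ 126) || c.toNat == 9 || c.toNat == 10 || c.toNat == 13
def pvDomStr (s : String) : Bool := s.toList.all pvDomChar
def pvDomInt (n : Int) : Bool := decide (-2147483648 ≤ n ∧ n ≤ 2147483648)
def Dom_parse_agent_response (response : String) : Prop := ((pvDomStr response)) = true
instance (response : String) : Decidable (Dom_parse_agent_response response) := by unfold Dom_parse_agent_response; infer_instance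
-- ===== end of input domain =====

-- B replaces A's per-line stateful loop (two accumulators, if/elif) by two anchored multiline
-- regex scans over the whole response, each followed by a comprehension (objective: idiomatic; same cost).

-- ===== PORT A =====
-- loop body of A's for-loop: state = (search_terms, actions)
def pvStepA (st : List String × List String) (line : String) : List String × List String :=
  if PySem.Str.startswith line "<search_terms>" && PySem.Str.endswith line "</search_terms>" then
    let terms := PySem.Str.strip (PySem.Str.slice line (some 14) (some (-15)))
    (st.1 ++ ((PySem.Str.split? terms ",").getD []).map (fun term => PySem.Str.strip term), st.2)
  else if PySem.Str.startswith line "<action>" && PySem.Str.endswith line "</action>" then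
    (st.1, st.2 ++ [PySem.Str.strip (PySem.Str.slice line (some 8) (some (-9)))])
  else st

def parse_agent_response (response : String) : List (String × List String) :=
  -- response.split('\n'): separator is nonempty, so split? is always `some`
  let st := ((PySem.Str.split? response "\n").getD []).foldl pvStepA ([], [])
  [("search_terms", st.1), ("actions", st.2)]

-- ===== PORT B =====
-- Hand port of  re.findall(r'^PRE(.*)SUF$', response, re.MULTILINE)  for the two concrete
-- tag patterns of Source B. It is EXACT for these patterns: '.' never matches '\n' and with
-- re.MULTILINE the anchors ^/$ match exactly at '\n' boundaries (and the string's ends), so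
-- the matches are exactly the '\n'-separated lines of the form PRE ++ mid ++ SUF (which needs
-- |line| ≥ |PRE|+|SUF|), in order, and the greedy capture (.*) is the whole middle part.
def pvMatchTag (pre suf line : String) : Option String :=
  let l := line.toList
  let p := pre.toList
  let s := suf.toList
  if p.length + s.length ≤ l.length ∧ l.take p.length = p ∧ l.drop (l.length - s.length) = s then
    some (String.ofList ((l.drop p.length).take (l.length - p.length - s.length)))
  else none

def pvFindallAnchored (response pre suf : String) : List String :=
  ((PySem.Str.split? response "\n").getD []).filterMap (pvMatchTag pre suf)

def parse_agent_response_alt (response : String) : List (String × List String) :=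
  let search_terms := (pvFindallAnchored response "<search_terms>" "</search_terms>").flatMap
      (fun content => ((PySem.Str.split? (PySem.Str.strip content) ",").getD []).map
        (fun t => PySem.Str.strip t))
  let actions := (pvFindallAnchored response "<action>" "</action>").map
      (fun c => PySem.Str.strip c)
  [("search_terms", search_terms), ("actions", actions)]

-- ===== PRECONDITION & SPEC =====
def Spec_parse_agent_response (response : String) (out : List (String × List String)) : Prop := out = parse_agent_response_alt response
instance (response : String) (out : List (String × List String)) : Decidable (Spec_parse_agent_response response out) := by unfold Spec_parse_agent_response; infer_instance

-- ===== CLAIM (what is proved, stated in full; the proofs are below) =====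
def Claim_equal_parse_agent_response : Prop := ∀ (response : String), Dom_parse_agent_response response → Spec_parse_agent_response response (parse_agent_response response)

-- ===== LEMMAS AND PROOFS =====

-- a line starting with '<search_terms>' cannot start with '<action>'
lemma pv_not_both (line : String)
    (h : PySem.Str.startswith line "<search_terms>" = true) :
    PySem.Str.startswith line "<action>" = false := by
  by_contra hc
  rw [Bool.not_eq_false] at hc
  rw [show PySem.Str.startswith = fun s p => PySem.Chars.startswith s.toList p.toList from rfl] at h hc
  rw [PySem.Chars.startswith_iff] at h hc
  obtain ⟨t1, h1⟩ := h
  obtain ⟨t2, h2⟩ := hc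
  rw [← h1] at h2
  simp at h2

-- the opening and closing tags cannot overlap in a line shorter than their combined length
lemma pv_no_overlap (pre suf : String) (line : String)
    (hno : ∀ d, d < pre.toList.length → pre.toList.drop d ≠ suf.toList.take (pre.toList.length - d))
    (hp : PySem.Str.startswith line pre = true)
    (hs : PySem.Str.endswith line suf = true) :
    pre.toList.length + suf.toList.length ≤ line.toList.length := by
  rw [show PySem.Str.startswith = fun s p => PySem.Chars.startswith s.toList p.toList from rfl] at hp
  rw [show PySem.Str.endswith = fun s p => PySem.Chars.endswith s.toList p.toList from rfl] at hs
  rw [PySem.Chars.startswith_iff] at hp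
  rw [PySem.Chars.endswith_iff] at hs
  obtain ⟨t, ht⟩ := hs
  by_contra hlt
  rw [not_le] at hlt
  have hlen : line.toList.length = t.length + suf.toList.length := by
    rw [← ht]; simp
  have hd : t.length < pre.toList.length := by omega
  have htake : line.toList.take pre.toList.length = pre.toList :=
    (List.prefix_iff_eq_take.mp hp).symm
  have hdrop : line.toList.drop t.length = suf.toList := by
    rw [← ht]; simp
  apply hno t.length hd
  calc pre.toList.drop t.length
      = (line.toList.take pre.toList.length).drop t.length := by rw [htake]
    _ = (line.toList.drop t.length).take (pre.toList.length - t.length) := List.drop_take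
    _ = suf.toList.take (pre.toList.length - t.length) := by rw [hdrop]

-- when A's branch test succeeds, the regex matcher returns exactly A's slice
lemma pvMatchTag_pos (pre suf line : String)
    (hno : ∀ d, d < pre.toList.length → pre.toList.drop d ≠ suf.toList.take (pre.toList.length - d))
    (h0s : 0 < suf.toList.length)
    (h : (PySem.Str.startswith line pre && PySem.Str.endswith line suf) = true) :
    pvMatchTag pre suf line =
      some (PySem.Str.slice line (some (pre.toList.length : Int)) (some (-(suf.toList.length : Int)))) := by
  rw [Bool.and_eq_true] at h
  obtain ⟨hp, hs⟩ := h
  have hlen := pv_no_overlap pre suf line hno hp hs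
  have hp' : line.toList.take pre.toList.length = pre.toList := by
    rw [show PySem.Str.startswith = fun s p => PySem.Chars.startswith s.toList p.toList from rfl] at hp
    rw [PySem.Chars.startswith_iff] at hp
    exact (List.prefix_iff_eq_take.mp hp).symm
  have hs' : line.toList.drop (line.toList.length - suf.toList.length) = suf.toList := by
    rw [show PySem.Str.endswith = fun s p => PySem.Chars.endswith s.toList p.toList from rfl] at hs
    rw [PySem.Chars.endswith_iff] at hs
    exact (List.suffix_iff_eq_drop.mp hs).symm
  have hslice : PySem.List.slice line.toList (some (pre.toList.length : Int)) (some (-(suf.toList.length : Int)))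
      = (line.toList.drop pre.toList.length).take
          (line.toList.length - pre.toList.length - suf.toList.length) := by
    rw [show PySem.List.slice line.toList (some (pre.toList.length : Int)) (some (-(suf.toList.length : Int)))
        = (line.toList.drop (PySem.List.clampIdx line.toList.length (pre.toList.length : Int))).take
            (PySem.List.clampIdx line.toList.length (-(suf.toList.length : Int))
              - PySem.List.clampIdx line.toList.length (pre.toList.length : Int)) from rfl]
    rw [PySem.List.clampIdx_natCast, PySem.List.clampIdx_neg_natCast _ _ h0s,
      Nat.min_eq_left (by omega)]
    congr 1
    omega
  rw [pvMatchTag]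
  simp only [hp', hs', and_true, if_pos hlen]
  refine congrArg some (String.toList_inj.mp ?_)
  rw [String.toList_ofList, PySem.Str.toList_slice, PySem.Chars.slice_eq_listSlice, hslice]

-- when A's branch test fails, the regex matcher rejects the line too
lemma pvMatchTag_neg (pre suf line : String)
    (h : (PySem.Str.startswith line pre && PySem.Str.endswith line suf) = false) :
    pvMatchTag pre suf line = none := by
  rw [pvMatchTag]
  split_ifs with hc
  · exfalso
    obtain ⟨hlen, hp, hs⟩ := hc
    have hp' : PySem.Str.startswith line pre = true := by
      rw [show PySem.Str.startswith = fun s p => PySem.Chars.startswith s.toList p.toList from rfl]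
      rw [PySem.Chars.startswith_iff]
      exact List.prefix_iff_eq_take.mpr hp.symm
    have hs' : PySem.Str.endswith line suf = true := by
      rw [show PySem.Str.endswith = fun s p => PySem.Chars.endswith s.toList p.toList from rfl]
      rw [PySem.Chars.endswith_iff]
      exact List.suffix_iff_eq_drop.mpr hs.symm
    rw [hp', hs'] at h
    simp at h
  · rfl

-- the concrete no-overlap facts for the two tag pairs
lemma pv_no_search (d : Nat) (hd : d < ("<search_terms>" : String).toList.length) :
    ("<search_terms>" : String).toList.drop d ≠
      ("</search_terms>" : String).toList.take (("<search_terms>" : String).toList.length - d) := by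
  have hl : ("<search_terms>" : String).toList.length = 14 := by decide
  rw [hl] at hd
  interval_cases d <;> decide

lemma pv_no_action (d : Nat) (hd : d < ("<action>" : String).toList.length) :
    ("<action>" : String).toList.drop d ≠
      ("</action>" : String).toList.take (("<action>" : String).toList.length - d) := by
  have hl : ("<action>" : String).toList.length = 8 := by decide
  rw [hl] at hd
  interval_cases d <;> decide

-- the loop of A computes exactly B's two regex passes
lemma pv_fold (lines : List String) (a b : List String) :
    lines.foldl pvStepA (a, b) =
      (a ++ (lines.filterMap (pvMatchTag "<search_terms>" "</search_terms>")).flatMap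
            (fun content => ((PySem.Str.split? (PySem.Str.strip content) ",").getD []).map
              (fun t => PySem.Str.strip t)),
       b ++ (lines.filterMap (pvMatchTag "<action>" "</action>")).map
            (fun c => PySem.Str.strip c)) := by
  induction lines generalizing a b with
  | nil => simp
  | cons l r ih =>
    by_cases hS : (PySem.Str.startswith l "<search_terms>" && PySem.Str.endswith l "</search_terms>") = true
    · have hA : (PySem.Str.startswith l "<action>" && PySem.Str.endswith l "</action>") = false := by
        rw [pv_not_both l ((Bool.and_eq_true ..).mp hS).1]; rfl
      rw [List.foldl_cons, List.filterMap_cons,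
        pvMatchTag_pos _ _ _ pv_no_search (by decide) hS,
        List.filterMap_cons, pvMatchTag_neg _ _ _ hA]
      show List.foldl pvStepA (pvStepA (a, b) l) r = _
      rw [pvStepA, if_pos hS, ih]
      simp
    · rw [List.foldl_cons, List.filterMap_cons (f := pvMatchTag "<search_terms>" "</search_terms>"),
        pvMatchTag_neg _ _ _ (by simpa using hS)]
      show List.foldl pvStepA (pvStepA (a, b) l) r = _
      by_cases hA : (PySem.Str.startswith l "<action>" && PySem.Str.endswith l "</action>") = true
      · rw [List.filterMap_cons, pvMatchTag_pos _ _ _ pv_no_action (by decide) hA,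
          pvStepA, if_neg (by simpa using hS), if_pos hA, ih]
        simp
      · rw [List.filterMap_cons, pvMatchTag_neg _ _ _ (by simpa using hA),
          pvStepA, if_neg (by simpa using hS), if_neg (by simpa using hA), ih]

-- ===== VERDICT (by name: the statement is the Claim_ definition above) =====
theorem parse_agent_response_spec : Claim_equal_parse_agent_response := by
  intro response _
  unfold Spec_parse_agent_response parse_agent_response parse_agent_response_alt pvFindallAnchored
  rw [pv_fold]
  norm_num
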